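-- pv_equiv track=rewrite | github.com/Tejapusarla-13/python_practice | String_excercises/String_04.py | lower_upper
-- ===== SOURCE A (Python) =====
-- def lower_upper(str1):
--
--     lower=""
--     upper=""
--     for i in str1:
--         if i.islower():
--             lower+=i
--         if i.isupper():
--             upper+=i
--     return lower+upper
-- ===== SOURCE B (Python) =====
-- def lower_upper(str1):
--     # Keep only cased characters, then stable-sort with key isupper:
--     # lowercase (False) sorts before uppercase (True), original order kept within each group.
--     return ''.join(sorted((c for c in str1 if c.islower() or c.isupper()), key=str.isupper))
-- ===== Notes on version B (the rewrite author's own statement) =====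
-- stated objective: idiomatic
-- what changed: Replaced A's two string accumulators built in an explicit loop by a filter of the cased characters followed by a stable sort keyed on isupper, whose stability reproduces the lowercase-then-uppercase partition.
import Mathlib
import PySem

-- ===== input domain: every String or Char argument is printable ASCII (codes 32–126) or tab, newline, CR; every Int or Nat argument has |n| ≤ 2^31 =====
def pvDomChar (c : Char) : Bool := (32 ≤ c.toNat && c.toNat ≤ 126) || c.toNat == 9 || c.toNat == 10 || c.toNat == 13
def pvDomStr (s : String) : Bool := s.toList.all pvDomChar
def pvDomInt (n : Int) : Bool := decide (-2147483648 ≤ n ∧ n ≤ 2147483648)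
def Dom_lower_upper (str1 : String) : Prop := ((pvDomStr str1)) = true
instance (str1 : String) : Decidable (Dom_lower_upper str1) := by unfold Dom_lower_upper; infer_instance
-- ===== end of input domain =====

-- B replaces A's two-accumulator loop by filter-then-stable-sort keyed on isupper (idiomatic).

-- ===== PORT A =====
-- A: one pass, two string accumulators (as char lists), return lower ++ upper.
def lower_upper (str1 : String) : String :=
  let p := str1.toList.foldl
    (fun (p : List Char × List Char) i =>
      (if PySem.Chars.islower i then p.1 ++ [i] else p.1,
       if PySem.Chars.isupper i then p.2 ++ [i] else p.2)) ([], [])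
  String.mk (p.1 ++ p.2)

-- ===== PORT B =====
-- B: keep cased characters, stable-sort with key isupper (False before True).
def lower_upper_alt (str1 : String) : String :=
  String.mk (PySem.List.sorted
    (str1.toList.filter (fun c => PySem.Chars.islower c || PySem.Chars.isupper c))
    (fun c => PySem.Chars.isupper c) false)

-- ===== PRECONDITION & SPEC =====
def Spec_lower_upper (str1 : String) (out : String) : Prop := out = lower_upper_alt str1
instance (str1 : String) (out : String) : Decidable (Spec_lower_upper str1 out) := by unfold Spec_lower_upper; infer_instance

-- ===== CLAIM (what is proved, stated in full; the proofs are below) =====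
def Claim_equal_lower_upper : Prop := ∀ (str1 : String), Dom_lower_upper str1 → Spec_lower_upper str1 (lower_upper str1)

-- ===== LEMMAS AND PROOFS =====

-- inserting x into a (false-keys ++ true-keys) list keeps the partition
theorem pv_insert_split (key : Char → Bool) (x : Char) (l u : List Char)
    (hl : ∀ c ∈ l, key c = false) (hu : ∀ c ∈ u, key c = true) :
    PySem.List.insertBy (fun a b => decide (key a < key b)) x (l ++ u) =
      if key x then l ++ u ++ [x] else l ++ x :: u := by
  induction l with
  | nil =>
    simp only [List.nil_append]
    induction u with
    | nil => simp [PySem.List.insertBy]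
    | cons y ys ih =>
      have hy : key y = true := hu y (by simp)
      have hys : ∀ c ∈ ys, key c = true := fun c hc => hu c (by simp [hc])
      cases hx : key x with
      | false => simp [PySem.List.insertBy, hy, hx]
      | true =>
        simp only [PySem.List.insertBy, hy, hx]
        simpa [hx] using ih hys
  | cons c cs ih =>
    have hc : key c = false := hl c (by simp)
    have hcs : ∀ d ∈ cs, key d = false := fun d hd => hl d (by simp [hd])
    have : (decide (key x < key c)) = false := by simp [hc]
    cases hx : key x with
    | false => simp [PySem.List.insertBy, hc, ih hcs, hx]
    | true => simp [PySem.List.insertBy, hc, ih hcs, hx]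

-- a stable sort by a Bool key is the false-part followed by the true-part
theorem pv_sorted_bool_split (key : Char → Bool) (ys : List Char) :
    PySem.List.sorted ys key false =
      ys.filter (fun c => !key c) ++ ys.filter key := by
  induction ys using List.reverseRecOn with
  | nil => simp [PySem.List.sorted]
  | append_singleton ys y ih =>
    have h1 : PySem.List.sorted (ys ++ [y]) key false =
        PySem.List.insertBy (fun a b => decide (key a < key b)) y
          (PySem.List.sorted ys key false) := by
      simp [PySem.List.sorted_eq_foldl_insertBy, List.foldl_append]
    rw [h1, ih, pv_insert_split key y _ _
      (by intro c hc; simpa using (List.mem_filter.mp hc).2)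
      (by intro c hc; exact (List.mem_filter.mp hc).2)]
    cases hy : key y <;> simp [List.filter_append, hy]

-- A's fold computes the two filters
theorem pv_foldA (xs : List Char) (l u : List Char) :
    xs.foldl (fun (p : List Char × List Char) i =>
      (if PySem.Chars.islower i then p.1 ++ [i] else p.1,
       if PySem.Chars.isupper i then p.2 ++ [i] else p.2)) (l, u) =
      (l ++ xs.filter PySem.Chars.islower, u ++ xs.filter PySem.Chars.isupper) := by
  induction xs generalizing l u with
  | nil => simp
  | cons c cs ih =>
    simp only [List.foldl_cons, ih]
    cases h1 : PySem.Chars.islower c <;> cases h2 : PySem.Chars.isupper c <;>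
      simp [List.filter_cons, h1, h2]

theorem pv_not_both (c : Char) : ¬(PySem.Chars.islower c = true ∧ PySem.Chars.isupper c = true) := by
  rintro ⟨h1, h2⟩
  simp only [PySem.Chars.islower, PySem.Chars.isupper, Bool.and_eq_true, decide_eq_true_eq,
    Char.le_def, UInt32.le_iff_toNat_le] at h1 h2
  have e1 : ('a' : Char).val.toNat = 97 := rfl
  have e2 : ('Z' : Char).val.toNat = 90 := rfl
  omega

-- ===== VERDICT (by name: the statement is the Claim_ definition above) =====
theorem lower_upper_spec : Claim_equal_lower_upper := by
  intro str1 _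
  show lower_upper str1 = lower_upper_alt str1
  unfold lower_upper lower_upper_alt
  rw [pv_sorted_bool_split, pv_foldA]
  simp only [List.nil_append, List.filter_filter]
  congr 1
  congr 1
  · apply List.filter_congr
    intro c _
    cases h1 : PySem.Chars.islower c <;> cases h2 : PySem.Chars.isupper c <;> simp [h1, h2]
    exact absurd ⟨h1, h2⟩ (pv_not_both c)
  · apply List.filter_congr
    intro c _
    cases h1 : PySem.Chars.islower c <;> cases h2 : PySem.Chars.isupper c <;> simp [h1, h2]
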